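-- pv_equiv track=rewrite | github.com/Livia-Tassel/MNN | exp/h2o_v4/offline_lossless_fp16.py | parse_predictor_list
-- ===== SOURCE A (Python) =====
-- VALID_PREDICTORS = {
--     "raw",
--     "delta_seq",
--     "xor_seq",
--     "pair_delta",
--     "pair_delta_delta_seq",
-- }
--
-- def parse_predictor_list(text, arg_name):
--     items = []
--     seen = set()
--     for part in text.split(","):
--         name = part.strip()
--         if not name:
--             continue
--         if name not in VALID_PREDICTORS:
--             raise SystemExit(f"{arg_name}: invalid predictor `{name}`")
--         if name not in seen:
--             items.append(name)
--             seen.add(name)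
--     if not items:
--         raise SystemExit(f"{arg_name}: predictor list is empty")
--     return items
-- ===== SOURCE B (Python) =====
-- VALID_PREDICTORS = {
--     "raw",
--     "delta_seq",
--     "xor_seq",
--     "pair_delta",
--     "pair_delta_delta_seq",
-- }
--
-- def _dedup_first(names):
--     # recursive first-occurrence dedup: keep the head, filter every later
--     # duplicate of it out of the tail, recurse on what remains
--     if not names:
--         return []
--     head = names[0]
--     return [head] + _dedup_first([n for n in names[1:] if n != head])
--
-- def parse_predictor_list(text, arg_name):
--     names = [p.strip() for p in text.split(",") if p.strip()]
--     for n in names: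
--         if n not in VALID_PREDICTORS:
--             raise SystemExit(f"{arg_name}: invalid predictor `{n}`")
--     if not names:
--         raise SystemExit(f"{arg_name}: predictor list is empty")
--     return _dedup_first(names)
-- ===== Notes on version B (the rewrite author's own statement) =====
-- stated objective: alternative
-- what changed: A's single fused loop maintaining an items list plus a seen-set is replaced by staged passes and a recursive filter-based dedup: keep the head and recurse on the tail with the head's duplicates filtered out, so no auxiliary seen structure exists and the data itself shrinks.
import Mathlib
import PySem

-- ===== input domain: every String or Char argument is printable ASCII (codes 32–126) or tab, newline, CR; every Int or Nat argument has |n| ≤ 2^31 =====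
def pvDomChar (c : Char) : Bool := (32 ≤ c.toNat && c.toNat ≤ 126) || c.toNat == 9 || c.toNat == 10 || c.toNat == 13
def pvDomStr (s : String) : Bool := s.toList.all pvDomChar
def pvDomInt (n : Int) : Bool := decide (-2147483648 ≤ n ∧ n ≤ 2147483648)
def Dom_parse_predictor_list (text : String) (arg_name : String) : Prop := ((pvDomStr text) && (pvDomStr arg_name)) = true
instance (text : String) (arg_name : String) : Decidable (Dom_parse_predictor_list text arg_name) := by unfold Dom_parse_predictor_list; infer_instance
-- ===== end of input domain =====

-- B replaces A's fused loop (items list + seen-set) by staged passes and a recursive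
-- filter-based dedup (keep the head, filter its duplicates out of the tail, recurse).
-- A raises SystemExit on invalid names / empty result; those inputs are outside Pre_.

-- VALID_PREDICTORS (module constant, a Python set)
def pvValid : PySem.Set String :=
  PySem.Set.ofList ["raw", "delta_seq", "xor_seq", "pair_delta", "pair_delta_delta_seq"]

-- ===== PORT A =====
-- the for-loop: state (items, seen); none = SystemExit "invalid predictor"
def pvLoopA : List String → List String → PySem.Set String → Option (List String)
  | [], items, _ => some items
  | part :: rest, items, seen =>
    let name := PySem.Str.strip part
    if name = "" then pvLoopA rest items seen
    else if PySem.Set.contains pvValid name = false then none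
    else if PySem.Set.contains seen name then pvLoopA rest items seen
    else pvLoopA rest (items ++ [name]) (PySem.Set.add seen name)

def parse_predictor_list (text : String) (arg_name : String) : List String :=
  match pvLoopA ((PySem.Str.split? text ",").getD []) [] PySem.Set.empty with
  | none => []                                  -- SystemExit: invalid predictor (outside Pre_)
  | some items => if items = [] then [] else items   -- [] case = SystemExit: empty (outside Pre_)

-- ===== PORT B =====
-- _dedup_first: recursive first-occurrence dedup (no seen structure; the list shrinks)
def pvDedupFirst : List String → List String
  | [] => []
  | x :: xs => x :: pvDedupFirst (xs.filter (fun n => n ≠ x))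
termination_by xs => xs.length
decreasing_by
  have h := List.length_filter_le (fun (n : {y // y ∈ xs}) => !decide (n.1 = x)) xs.attach
  simp at h ⊢; omega

def parse_predictor_list_alt (text : String) (arg_name : String) : List String :=
  let names := (((PySem.Str.split? text ",").getD []).map PySem.Str.strip).filter (fun n => n != "")
  -- validation pass (SystemExit on an invalid name: outside Pre_)
  if names.any (fun n => !(PySem.Set.contains pvValid n)) then []
  else if names = [] then []                    -- SystemExit: empty (outside Pre_)
  else pvDedupFirst names

-- ===== PRECONDITION & SPEC =====
-- Pre_ excludes exactly the inputs on which A raises SystemExit: some stripped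
-- non-empty piece is not a valid predictor, or there is no non-empty piece at all.
def Pre_parse_predictor_list (text : String) (arg_name : String) : Prop :=
  (∀ n ∈ (((PySem.Str.split? text ",").getD []).map PySem.Str.strip).filter (fun n => n != ""),
      PySem.Set.contains pvValid n = true) ∧
  (((PySem.Str.split? text ",").getD []).map PySem.Str.strip).filter (fun n => n != "") ≠ []
instance (text : String) (arg_name : String) : Decidable (Pre_parse_predictor_list text arg_name) := by
  unfold Pre_parse_predictor_list; infer_instance

def pvWitness_parse_predictor_list : String × String := ("raw, delta_seq,raw", "--predictors")

def Spec_parse_predictor_list (text : String) (arg_name : String) (out : List String) : Prop := out = parse_predictor_list_alt text arg_name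
instance (text : String) (arg_name : String) (out : List String) : Decidable (Spec_parse_predictor_list text arg_name out) := by unfold Spec_parse_predictor_list; infer_instance

-- ===== CLAIM (what is proved, stated in full; the proofs are below) =====
def Claim_equal_parse_predictor_list : Prop := ∀ (text : String) (arg_name : String), Dom_parse_predictor_list text arg_name → Pre_parse_predictor_list text arg_name → Spec_parse_predictor_list text arg_name (parse_predictor_list text arg_name)

-- ===== LEMMAS AND PROOFS =====

-- equation lemmas for the well-founded recursion pvDedupFirst
lemma pvDedupFirst_nil : pvDedupFirst [] = [] := by rw [pvDedupFirst.eq_def]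
lemma pvDedupFirst_cons (x : String) (xs : List String) :
    pvDedupFirst (x :: xs) = x :: pvDedupFirst (xs.filter (fun n => n ≠ x)) := by
  rw [pvDedupFirst.eq_def]

-- loop invariant: with seen = items (as lists), A's loop collects exactly
-- Set.update items names, i.e. the fold of Set.add over the good names.
lemma pvLoopA_inv (parts : List String) : ∀ (items : List String),
    (∀ n ∈ (parts.map PySem.Str.strip).filter (fun n => n != ""),
        PySem.Set.contains pvValid n = true) →
    pvLoopA parts items items =
      some (PySem.Set.update items ((parts.map PySem.Str.strip).filter (fun n => n != ""))) := by
  induction parts with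
  | nil => intro items _; simp [pvLoopA, PySem.Set.update]
  | cons part rest ih =>
    intro items hval
    by_cases h : PySem.Str.strip part = ""
    · simpa [pvLoopA, h] using ih items (by simpa [h] using hval)
    · have hv : PySem.Set.contains pvValid (PySem.Str.strip part) = true := by
        apply hval; simp [h]
      have hv' : PySem.Str.strip part ∈ pvValid := by
        simpa [PySem.Set.contains] using hv
      have hrest : ∀ n ∈ (rest.map PySem.Str.strip).filter (fun n => n != ""),
          PySem.Set.contains pvValid n = true := by
        intro n hn
        apply hval
        simp only [List.map_cons, List.filter_cons]
        have : (PySem.Str.strip part != "") = true := by simpa using h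
        simp [this, hn]
      have hfc : ((part :: rest).map PySem.Str.strip).filter (fun n => n != "")
          = PySem.Str.strip part :: (rest.map PySem.Str.strip).filter (fun n => n != "") := by
        simp [h]
      by_cases hc : PySem.Str.strip part ∈ items
      · have hadd : PySem.Set.add items (PySem.Str.strip part) = items := by
          simp [PySem.Set.add, PySem.Set.contains, hc]
        rw [hfc]
        have hu : PySem.Set.update items (PySem.Str.strip part
            :: (rest.map PySem.Str.strip).filter (fun n => n != ""))
            = PySem.Set.update items ((rest.map PySem.Str.strip).filter (fun n => n != "")) := by
          simp [PySem.Set.update, hadd]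
        rw [hu]
        simpa [pvLoopA, h, hv', hc] using ih items hrest
      · have hadd : PySem.Set.add items (PySem.Str.strip part) = items ++ [PySem.Str.strip part] := by
          simp [PySem.Set.add, PySem.Set.contains, hc]
        rw [hfc]
        have hu : PySem.Set.update items (PySem.Str.strip part
            :: (rest.map PySem.Str.strip).filter (fun n => n != ""))
            = PySem.Set.update (items ++ [PySem.Str.strip part])
                ((rest.map PySem.Str.strip).filter (fun n => n != "")) := by
          simp [PySem.Set.update, hadd]
        rw [hu]
        simpa [pvLoopA, h, hv', hc, hadd] using ih (items ++ [PySem.Str.strip part]) hrest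

-- the bridge between the two dedup mechanisms: folding Set.add from an accumulator
-- equals the accumulator followed by the recursive filter-dedup of the unseen part.
lemma update_eq_dedupFirst (xs : List String) : ∀ (acc : List String),
    PySem.Set.update acc xs = acc ++ pvDedupFirst (xs.filter (fun n => n ∉ acc)) := by
  induction xs with
  | nil => intro acc; simp [PySem.Set.update, pvDedupFirst_nil]
  | cons x xs ih =>
    intro acc
    have hupd : PySem.Set.update acc (x :: xs) = PySem.Set.update (PySem.Set.add acc x) xs := by
      simp [PySem.Set.update]
    by_cases hx : x ∈ acc
    · have hadd : PySem.Set.add acc x = acc := by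
        simp [PySem.Set.add, PySem.Set.contains, hx]
      have hf : (x :: xs).filter (fun n => n ∉ acc) = xs.filter (fun n => n ∉ acc) := by
        simp [List.filter_cons, hx]
      rw [hupd, hadd, hf, ih acc]
    · have hadd : PySem.Set.add acc x = acc ++ [x] := by
        simp [PySem.Set.add, PySem.Set.contains, hx]
      have hf : (x :: xs).filter (fun n => n ∉ acc) = x :: xs.filter (fun n => n ∉ acc) := by
        simp [List.filter_cons, hx]
      have hff : xs.filter (fun n => n ∉ acc ++ [x])
          = (xs.filter (fun n => n ∉ acc)).filter (fun n => n ≠ x) := by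
        rw [List.filter_filter]
        apply List.filter_congr
        intro n _
        by_cases h1 : n ∈ acc <;> by_cases h2 : n = x <;> simp [h1, h2]
      rw [hupd, hadd, ih (acc ++ [x]), hff, hf, pvDedupFirst_cons]
      simp

-- ===== VERDICT (by name: the statement is the Claim_ definition above) =====
theorem parse_predictor_list_spec : Claim_equal_parse_predictor_list := by
  intro text arg_name _ hpre
  obtain ⟨hval, hne⟩ := hpre
  unfold Spec_parse_predictor_list parse_predictor_list parse_predictor_list_alt
  set names := (((PySem.Str.split? text ",").getD []).map PySem.Str.strip).filter (fun n => n != "") with hnames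
  have hloop := pvLoopA_inv ((PySem.Str.split? text ",").getD []) [] hval
  have hupd : PySem.Set.update ([] : PySem.Set String) names = pvDedupFirst names := by
    have := update_eq_dedupFirst names []
    simpa using this
  have hany : names.any (fun n => !(PySem.Set.contains pvValid n)) = false := by
    simp only [List.any_eq_false]
    intro n hn
    simpa [PySem.Set.contains] using hval n hn
  have hded : pvDedupFirst names ≠ [] := by
    obtain ⟨y, ys, h⟩ := List.exists_cons_of_ne_nil hne
    rw [h, pvDedupFirst_cons]
    simp
  have hempty : (PySem.Set.empty : PySem.Set String) = [] := rfl
  rw [hempty, hloop, hupd]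
  simp [hne, hded]
  intro x hx
  simpa [PySem.Set.contains] using hval x hx
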